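-- pv_equiv track=rewrite | github.com/nsimeyroneinc/NSITerm2024 | python/DS0011/Ex1.py | retourner_lucasP
-- ===== SOURCE A (Python) =====
-- def creer_pile_vide():
--     return []
--
-- def est_vide(P):
--     if P==[]:
--         return True
--     else:
--         return False
--
-- def empiler(P,x):
--     P.append(x)
--
-- def depiler(P):
--     if est_vide(P) == True :
--         raise IndexError("Vous avez essayé de dépiler une pile vide !")
--     else :
--         return P.pop()
--
-- def retourner_lucasP(P,j):
--
--     Q=creer_pile_vide()
--     R=creer_pile_vide()
--     nb=0
--     while nb<j and not est_vide(P):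
--         nb+=1
--         empiler(Q,depiler(P))
--     nb=0
--     while nb<j and not est_vide(Q):
--         nb+=1
--         empiler(R,depiler(Q))
--     nb=0
--     while nb <j and not est_vide(R):
--         nb+=1
--         empiler(P,depiler(R))
--     return P
-- ===== SOURCE B (Python) =====
-- def retourner_lucasP(P, j):
--     n = len(P)
--     k = max(0, min(j, n))
--     P[n - k:] = P[n - k:][::-1]
--     return P
-- ===== Notes on version B (the rewrite author's own statement) =====
-- stated objective: simpler
-- what changed: Replaced the three guarded stack-to-stack transfer loops by a direct in-place reversal of the top k = max(0, min(j, len(P))) slice, since an odd number of stack transfers is just a reversal.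
import Mathlib
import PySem

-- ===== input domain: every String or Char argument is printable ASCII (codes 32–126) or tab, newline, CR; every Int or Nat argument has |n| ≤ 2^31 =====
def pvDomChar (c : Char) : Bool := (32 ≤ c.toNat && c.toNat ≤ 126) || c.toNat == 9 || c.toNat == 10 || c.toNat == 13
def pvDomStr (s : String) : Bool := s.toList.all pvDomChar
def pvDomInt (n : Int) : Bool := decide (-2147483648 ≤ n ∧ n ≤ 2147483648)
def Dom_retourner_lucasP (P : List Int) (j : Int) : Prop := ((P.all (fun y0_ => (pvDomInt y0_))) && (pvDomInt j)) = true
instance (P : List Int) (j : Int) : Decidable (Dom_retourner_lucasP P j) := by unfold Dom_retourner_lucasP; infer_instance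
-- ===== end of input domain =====

-- B replaces A's three guarded stack-to-stack transfer loops by one in-place reversal of the
-- top max(0, min(j, len(P))) slice (an odd number of stack transfers is a reversal); return value only
-- is proved equal (both Pythons mutate P in place identically).

-- ===== PORT A =====
-- one 'while nb<j and not est_vide(src): nb+=1; empiler(dst, depiler(src))' loop;
-- stacks are lists with the top at the END (append/pop), as in the Python.
def pvMove (j : Int) (nb : Int) (src dst : List Int) : List Int × List Int :=
  if h : nb < j ∧ src ≠ [] then
    pvMove j (nb + 1) src.dropLast (dst ++ [src.getLast h.2])
  else (src, dst)
termination_by src.length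
decreasing_by
  have := List.length_pos_iff.mpr h.2
  simp [List.length_dropLast]; omega

def retourner_lucasP (P : List Int) (j : Int) : List Int :=
  let pq := pvMove j 0 P []        -- P → Q
  let qr := pvMove j 0 pq.2 []     -- Q → R
  let rp := pvMove j 0 qr.2 pq.1   -- R → P
  rp.2

-- ===== PORT B =====
def retourner_lucasP_alt (P : List Int) (j : Int) : List Int :=
  let n : Int := P.length
  let k : Int := max 0 (min j n)
  P.take (n - k).toNat ++ (P.drop (n - k).toNat).reverse

-- ===== PRECONDITION & SPEC =====
def Spec_retourner_lucasP (P : List Int) (j : Int) (out : List Int) : Prop := out = retourner_lucasP_alt P j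
instance (P : List Int) (j : Int) (out : List Int) : Decidable (Spec_retourner_lucasP P j out) := by unfold Spec_retourner_lucasP; infer_instance

-- ===== CLAIM (what is proved, stated in full; the proofs are below) =====
def Claim_equal_retourner_lucasP : Prop := ∀ (P : List Int) (j : Int), Dom_retourner_lucasP P j → Spec_retourner_lucasP P j (retourner_lucasP P j)

-- ===== LEMMAS AND PROOFS =====

-- the transfer loop pops m = min((j-nb)⁺, |src|) elements off src's top and pushes them onto dst
lemma pvMove_eq (j : Int) (src : List Int) : ∀ (nb : Int) (dst : List Int),
    pvMove j nb src dst =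
      (src.take (src.length - min (j - nb).toNat src.length),
       dst ++ (src.drop (src.length - min (j - nb).toNat src.length)).reverse) := by
  induction src using List.reverseRecOn with
  | nil => intro nb dst; rw [pvMove]; simp
  | append_singleton l x ih =>
    intro nb dst
    rw [pvMove]
    by_cases hj : nb < j
    · have hne : l ++ [x] ≠ [] := by simp
      rw [dif_pos ⟨hj, hne⟩]
      simp only [List.dropLast_concat, List.getLast_concat]
      rw [ih]
      have hlen : (l ++ [x]).length = l.length + 1 := by simp
      set m' := min (j - (nb + 1)).toNat l.length with hm'
      have hm : min (j - nb).toNat (l ++ [x]).length = m' + 1 := by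
        simp only [hlen, hm']; omega
      rw [hm]
      have h1 : (l ++ [x]).length - (m' + 1) = l.length - m' := by omega
      have h2 : l.length - m' ≤ l.length := by omega
      rw [h1]
      simp only [Prod.mk.injEq]
      constructor
      · rw [List.take_append_of_le_length h2]
      · rw [List.drop_append_of_le_length h2]
        simp
    · rw [dif_neg (by simp [hj])]
      have : min (j - nb).toNat (l ++ [x]).length = 0 := by
        have : (j - nb).toNat = 0 := by omega
        simp [this]
      rw [this]
      simp

-- ===== VERDICT (by name: the statement is the Claim_ definition above) =====
theorem retourner_lucasP_spec : Claim_equal_retourner_lucasP := by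
  intro P j _
  unfold Spec_retourner_lucasP
  simp only [retourner_lucasP, retourner_lucasP_alt]
  set n := P.length with hn
  set m := min j.toNat n with hm
  have h0 : (j - 0).toNat = j.toNat := by omega
  have e1 : pvMove j 0 P [] = (P.take (n - m), (P.drop (n - m)).reverse) := by
    rw [pvMove_eq, h0, ← hn, ← hm]
    simp
  have hQlen : ((P.drop (n - m)).reverse).length = m := by
    simp [hn]; omega
  have e2 : pvMove j 0 ((P.drop (n - m)).reverse) [] = ([], P.drop (n - m)) := by
    rw [pvMove_eq, h0, hQlen]
    have hmin : min j.toNat m = m := by omega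
    rw [hmin]
    simp
  have hRlen : (P.drop (n - m)).length = m := by
    simp [hn]; omega
  have e3 : pvMove j 0 (P.drop (n - m)) (P.take (n - m)) =
      ([], P.take (n - m) ++ (P.drop (n - m)).reverse) := by
    rw [pvMove_eq, h0, hRlen]
    have hmin : min j.toNat m = m := by omega
    rw [hmin]
    simp
  simp only [e1, e2, e3]
  have hk : ((n : Int) - max 0 (min j (n : Int))).toNat = n - m := by omega
  rw [hk]
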